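-- pv_equiv track=rewrite | github.com/pytorch/pytorch | torch/utils/data/datapipes/iter/tiling.py | _generate_hilbert_indices
-- ===== SOURCE A (Python) =====
-- def _hilbert_d2xy(n: int, d: int) -> tuple[int, int]:
--     """Convert Hilbert curve index d to (x, y) coordinates.
--
--     Args:
--         n: Size of the grid (must be power of 2)
--         d: Index along the Hilbert curve
--
--     Returns:
--         Tuple of (x, y) coordinates
--     """
--     x = y = 0
--     s = 1
--     while s < n:
--         rx = 1 & (d // 2)
--         ry = 1 & (d ^ rx)
--         if ry == 0:
--             if rx == 1:
--                 x = s - 1 - x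
--                 y = s - 1 - y
--             x, y = y, x
--         x += s * rx
--         y += s * ry
--         d //= 4
--         s *= 2
--     return x, y
--
-- def _next_power_of_2(n: int) -> int:
--     """Return the smallest power of 2 >= n."""
--     if n <= 0:
--         return 1
--     n -= 1
--     n |= n >> 1
--     n |= n >> 2
--     n |= n >> 4
--     n |= n >> 8
--     n |= n >> 16
--     return n + 1
--
-- def _generate_hilbert_indices(rows: int, cols: int) -> list[tuple[int, int]]:
--     """Generate tile indices in Hilbert curve order.
--
--     Args:
--         rows: Number of tile rows
--         cols: Number of tile columns
--
--     Returns: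
--         List of (row, col) tuples in Hilbert curve order
--     """
--     # Use the larger dimension to determine grid size
--     n = _next_power_of_2(max(rows, cols))
--     indices = []
--     seen = set()
--
--     # Generate all Hilbert curve indices and filter valid ones
--     for d in range(n * n):
--         x, y = _hilbert_d2xy(n, d)
--         if y < rows and x < cols and (y, x) not in seen:
--             indices.append((y, x))
--             seen.add((y, x))
--
--     return indices
-- ===== SOURCE B (Python) =====
-- def _next_power_of_2(n: int) -> int:
--     """Return the smallest power of 2 >= n."""
--     if n <= 0:
--         return 1
--     n -= 1
--     n |= n >> 1
--     n |= n >> 2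
--     n |= n >> 4
--     n |= n >> 8
--     n |= n >> 16
--     return n + 1
--
-- def _generate_hilbert_indices(rows: int, cols: int) -> list[tuple[int, int]]:
--     """Generate tile indices in Hilbert curve order.
--
--     Builds the whole curve of the 2^k x 2^k grid level by level (each level
--     glues four transformed copies of the previous one), then filters to the
--     requested bounds; no per-point bit loop and no seen-set.
--     """
--     n = _next_power_of_2(max(rows, cols))
--     k = 0
--     s = 1
--     while s < n:
--         s *= 2
--         k += 1
--     grid = [(0, 0)]
--     t = 1
--     for _ in range(k):
--         grid = ([(y, x) for (x, y) in grid]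
--                 + [(x, y + t) for (x, y) in grid]
--                 + [(x + t, y + t) for (x, y) in grid]
--                 + [(2 * t - 1 - y, t - 1 - x) for (x, y) in grid])
--         t *= 2
--     return [(y, x) for (x, y) in grid if y < rows and x < cols]
-- ===== Notes on version B (the rewrite author's own statement) =====
-- stated objective: faster
-- what changed: Instead of running the per-index d2xy bit loop for every d in range(n*n) and deduplicating with a seen-set, B builds the whole Hilbert curve level by level (each level concatenates four transformed copies of the previous level) and then filters once to the requested bounds, removing the per-point log(n) loop and the set operations; intended as faster, measured 4.8-9.5x on the sizes where both finish (7.68x at the largest such size).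
import Mathlib
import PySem

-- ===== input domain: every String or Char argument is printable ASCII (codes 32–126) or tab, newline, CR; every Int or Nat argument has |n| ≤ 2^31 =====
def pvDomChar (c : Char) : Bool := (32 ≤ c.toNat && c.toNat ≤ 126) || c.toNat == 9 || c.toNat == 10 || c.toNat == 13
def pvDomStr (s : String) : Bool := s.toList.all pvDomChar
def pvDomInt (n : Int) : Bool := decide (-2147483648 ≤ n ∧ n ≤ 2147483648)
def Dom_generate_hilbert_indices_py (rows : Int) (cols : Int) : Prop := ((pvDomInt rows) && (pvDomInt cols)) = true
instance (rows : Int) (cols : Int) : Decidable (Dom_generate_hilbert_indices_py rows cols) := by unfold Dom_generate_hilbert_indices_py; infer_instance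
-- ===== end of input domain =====

-- B replaces A's per-index Hilbert bit-loop and seen-set with a level-by-level construction of the
-- whole curve (four transformed copies per level) followed by one filter: intended as faster
-- (measured 4.8-9.5x on the generated sizes where both programs finish).


-- ===== PORT A =====
def pvA_next_power_of_2 (n : Int) : Int :=
  if n ≤ 0 then 1
  else
    let m := n - 1
    let m := PySem.Int.bor m (m >>> (1 : Nat))
    let m := PySem.Int.bor m (m >>> (2 : Nat))
    let m := PySem.Int.bor m (m >>> (4 : Nat))
    let m := PySem.Int.bor m (m >>> (8 : Nat))
    let m := PySem.Int.bor m (m >>> (16 : Nat))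
    m + 1

-- 'while s < n' ported with fuel 64: on the stated domain n ≤ 2^32, so the loop makes ≤ 32 iterations
def pvA_hilbert_loop (fuel : Nat) (n x y d s : Int) : Int × Int :=
  match fuel with
  | 0 => (x, y)
  | fuel + 1 =>
    if s < n then
      let rx := PySem.Int.band 1 (PySem.Int.floordiv d 2)
      let ry := PySem.Int.band 1 (PySem.Int.bxor d rx)
      let xy : Int × Int :=
        if ry = 0 then
          let xy := if rx = 1 then (s - 1 - x, s - 1 - y) else (x, y)
          (xy.2, xy.1)
        else (x, y)
      pvA_hilbert_loop fuel n (xy.1 + s * rx) (xy.2 + s * ry) (PySem.Int.floordiv d 4) (s * 2)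
    else (x, y)

def pvA_hilbert_d2xy (n d : Int) : Int × Int := pvA_hilbert_loop 64 n 0 0 d 1

def generate_hilbert_indices_py (rows : Int) (cols : Int) : List (Int × Int) :=
  let n := pvA_next_power_of_2 (max rows cols)
  ((PySem.List.pyRange 0 (n * n) 1).foldl
    (fun (st : List (Int × Int) × PySem.Set (Int × Int)) d =>
      let xy := pvA_hilbert_d2xy n d
      if xy.2 < rows ∧ xy.1 < cols ∧ (xy.2, xy.1) ∉ st.2 then
        (st.1 ++ [(xy.2, xy.1)], PySem.Set.add st.2 (xy.2, xy.1))
      else st)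
    ([], (PySem.Set.empty : PySem.Set (Int × Int)))).1

-- ===== PORT B =====
def pvB_next_power_of_2 (n : Int) : Int :=
  if n ≤ 0 then 1
  else
    let m := n - 1
    let m := PySem.Int.bor m (m >>> (1 : Nat))
    let m := PySem.Int.bor m (m >>> (2 : Nat))
    let m := PySem.Int.bor m (m >>> (4 : Nat))
    let m := PySem.Int.bor m (m >>> (8 : Nat))
    let m := PySem.Int.bor m (m >>> (16 : Nat))
    m + 1

-- 'k = 0; s = 1; while s < n: s *= 2; k += 1' ported with fuel 64 (≤ 32 iterations on the domain)
def pvB_logloop (fuel : Nat) (n s : Int) (k : Nat) : Nat :=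
  match fuel with
  | 0 => k
  | fuel + 1 => if s < n then pvB_logloop fuel n (s * 2) (k + 1) else k

-- the 'for _ in range(k)' build loop (its doubling variable t is 2^k at level k)
def pvB_build (k : Nat) : List (Int × Int) :=
  match k with
  | 0 => [(0, 0)]
  | k + 1 =>
    let g := pvB_build k
    let t : Int := 2 ^ k
    g.map (fun p => (p.2, p.1)) ++ g.map (fun p => (p.1, p.2 + t)) ++
      g.map (fun p => (p.1 + t, p.2 + t)) ++ g.map (fun p => (2 * t - 1 - p.2, t - 1 - p.1))

def generate_hilbert_indices_py_alt (rows : Int) (cols : Int) : List (Int × Int) :=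
  let n := pvB_next_power_of_2 (max rows cols)
  let k := pvB_logloop 64 n 1 0
  ((pvB_build k).filter (fun p => decide (p.2 < rows ∧ p.1 < cols))).map (fun p => (p.2, p.1))

-- ===== PRECONDITION & SPEC =====
def Spec_generate_hilbert_indices_py (rows : Int) (cols : Int) (out : List (Int × Int)) : Prop := out = generate_hilbert_indices_py_alt rows cols
instance (rows : Int) (cols : Int) (out : List (Int × Int)) : Decidable (Spec_generate_hilbert_indices_py rows cols out) := by unfold Spec_generate_hilbert_indices_py; infer_instance

-- ===== CLAIM (what is proved, stated in full; the proofs are below) =====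
def Claim_equal_generate_hilbert_indices_py : Prop := ∀ (rows : Int) (cols : Int), Dom_generate_hilbert_indices_py rows cols → Spec_generate_hilbert_indices_py rows cols (generate_hilbert_indices_py rows cols)

-- ===== LEMMAS AND PROOFS =====
def pvBody (s : Int) (st : Int × Int × Int) : Int × Int × Int :=
  let x := st.1; let y := st.2.1; let d := st.2.2
  let rx := PySem.Int.band 1 (PySem.Int.floordiv d 2)
  let ry := PySem.Int.band 1 (PySem.Int.bxor d rx)
  let xy : Int × Int :=
    if ry = 0 then
      let xy := if rx = 1 then (s - 1 - x, s - 1 - y) else (x, y)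
      (xy.2, xy.1)
    else (x, y)
  (xy.1 + s * rx, xy.2 + s * ry, PySem.Int.floordiv d 4)

def pvChain (m : Nat) (s : Int) (st : Int × Int × Int) : Int × Int × Int :=
  match m with
  | 0 => st
  | m + 1 => pvChain m (2 * s) (pvBody s st)

theorem pv_band1 (a : Int) : PySem.Int.band 1 a = PySem.Int.mod a 2 := by
  rw [PySem.Int.band_comm]; exact PySem.Int.band_one a

theorem pv_nat_xor_mod_two (a b : Nat) : (a ^^^ b) % 2 = (a % 2 + b % 2) % 2 := by
  have h := Nat.testBit_xor a b 0
  simp only [Nat.testBit_zero] at h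
  rcases Nat.mod_two_eq_zero_or_one a with h1 | h1 <;> rcases Nat.mod_two_eq_zero_or_one b with h2 | h2 <;>
    simp [h1, h2] at h ⊢ <;> omega

theorem pv_xor_mod_two (a b : Int) (ha : 0 ≤ a) (hb : 0 ≤ b) :
    PySem.Int.mod (PySem.Int.bxor a b) 2 = if a % 2 = b % 2 then 0 else 1 := by
  rw [PySem.Int.bxor_of_nonneg ha hb]
  rw [show ((2 : Int)) = ((2 : Nat) : Int) from rfl, PySem.Int.mod_natCast]
  have hx := pv_nat_xor_mod_two a.toNat b.toNat
  split_ifs with h <;> omega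

theorem pvBody_t0 (s x y : Int) : pvBody s (x, y, 0) = (y, x, 0) := by simp [pvBody]

theorem pvBody_t1 (s x y : Int) : pvBody s (x, y, 1) = (x, y + s, 0) := by simp [pvBody]

theorem pvBody_t2 (s x y : Int) : pvBody s (x, y, 2) = (x + s, y + s, 0) := by
  simp [pvBody, show PySem.Int.band 1 (PySem.Int.bxor 2 1) = 1 from by decide]

theorem pvBody_t3 (s x y : Int) : pvBody s (x, y, 3) = (2 * s - 1 - y, s - 1 - x, 0) := by
  simp [pvBody, show PySem.Int.band 1 (PySem.Int.bxor 3 1) = 0 from by decide]; ring_nf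

theorem pvChain_succ_last (m : Nat) : ∀ (s : Int) (st : Int × Int × Int),
    pvChain (m + 1) s st = pvBody (2 ^ m * s) (pvChain m s st) := by
  induction m with
  | zero => intro s st; simp [pvChain]
  | succ m ih =>
    intro s st
    show pvChain (m + 1) (2 * s) (pvBody s st) = _
    rw [ih (2 * s) (pvBody s st)]
    have : 2 ^ m * (2 * s) = 2 ^ (m + 1) * s := by ring
    rw [this]; rfl

theorem pvBody_split (s x y Q r : Int) (hQ : 0 ≤ Q) (hr0 : 0 ≤ r) (hr4 : r < 4) :
    pvBody s (x, y, 4 * Q + r) = ((pvBody s (x, y, r)).1, (pvBody s (x, y, r)).2.1, Q) := by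
  have h2 : (0:Int) < 2 := by norm_num
  have h4 : (0:Int) < 4 := by norm_num
  have hdiv4 : PySem.Int.floordiv (4 * Q + r) 4 = Q := by
    rw [PySem.Int.floordiv_eq_ediv_of_pos h4]; omega
  have hrx : PySem.Int.band 1 (PySem.Int.floordiv (4 * Q + r) 2) =
      PySem.Int.band 1 (PySem.Int.floordiv r 2) := by
    rw [pv_band1, pv_band1, PySem.Int.floordiv_eq_ediv_of_pos h2, PySem.Int.floordiv_eq_ediv_of_pos h2,
      PySem.Int.mod_eq_emod_of_pos h2, PySem.Int.mod_eq_emod_of_pos h2]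
    omega
  have hrxv : PySem.Int.band 1 (PySem.Int.floordiv r 2) = 0 ∨ PySem.Int.band 1 (PySem.Int.floordiv r 2) = 1 := by
    rw [pv_band1, PySem.Int.floordiv_eq_ediv_of_pos h2, PySem.Int.mod_eq_emod_of_pos h2]; omega
  have hrynn : ∀ rx : Int, rx = 0 ∨ rx = 1 →
      PySem.Int.band 1 (PySem.Int.bxor (4 * Q + r) rx) = PySem.Int.band 1 (PySem.Int.bxor r rx) := by
    intro rx hx
    rw [pv_band1, pv_band1, pv_xor_mod_two _ _ (by omega) (by rcases hx with h|h <;> omega),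
        pv_xor_mod_two _ _ hr0 (by rcases hx with h|h <;> omega)]
    have : (4 * Q + r) % 2 = r % 2 := by omega
    rw [this]
  simp only [pvBody, hdiv4, hrx, hrynn _ hrxv]

theorem pvChain_split : ∀ (m : Nat) (s x y q e : Int), 0 ≤ q → 0 ≤ e → e < 4 ^ m →
    pvChain m s (x, y, q * 4 ^ m + e) =
      ((pvChain m s (x, y, e)).1, (pvChain m s (x, y, e)).2.1, q) := by
  intro m
  induction m with
  | zero =>
    intro s x y q e hq he0 he1
    have : e = 0 := by simpa using (by omega : e = 0)
    subst this
    simp [pvChain]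
  | succ m ih =>
    intro s x y q e hq he0 he1
    have h4 : (0:Int) < 4 := by norm_num
    set E := e / 4 with hE
    set r := e % 4 with hr
    have her : e = 4 * E + r := by omega
    have hE0 : 0 ≤ E := by positivity
    have hElt : E < 4 ^ m := by
      have : (4:Int) ^ (m + 1) = 4 * 4 ^ m := by ring
      omega
    have hr0 : 0 ≤ r := by omega
    have hr4 : r < 4 := by omega
    have hbig : q * 4 ^ (m + 1) + e = 4 * (q * 4 ^ m + E) + r := by
      rw [her]; ring
    show pvChain m (2 * s) (pvBody s (x, y, q * 4 ^ (m+1) + e)) = _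
    rw [hbig, pvBody_split s x y _ r (by positivity) hr0 hr4]
    have hrhs : pvChain (m+1) s (x, y, e) = pvChain m (2*s) (pvBody s (x, y, 4 * E + r)) := by
      rw [← her]; rfl
    rw [hrhs, pvBody_split s x y E r hE0 hr0 hr4]
    exact ih (2 * s) _ _ q E hq hE0 hElt

theorem pv_loop_eq_chain : ∀ (m i fuel : Nat) (x y d : Int), m ≤ fuel →
    pvA_hilbert_loop fuel (2 ^ (i + m)) x y d (2 ^ i) =
      ((pvChain m (2 ^ i) (x, y, d)).1, (pvChain m (2 ^ i) (x, y, d)).2.1) := by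
  intro m
  induction m with
  | zero =>
    intro i fuel x y d _
    have hlt : ¬ ((2:Int) ^ i < 2 ^ (i + 0)) := by simp
    cases fuel with
    | zero => simp [pvA_hilbert_loop, pvChain]
    | succ fuel => simp [pvA_hilbert_loop, pvChain]
  | succ m ih =>
    intro i fuel x y d hf
    cases fuel with
    | zero => omega
    | succ fuel =>
      have hlt : (2:Int) ^ i < 2 ^ (i + (m + 1)) :=
        pow_lt_pow_right₀ one_lt_two (by omega)
      have hs2 : (2:Int) ^ i * 2 = 2 ^ (i + 1) := by rw [pow_succ]
      have hn : i + (m + 1) = (i + 1) + m := by omega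
      simp only [pvA_hilbert_loop, if_pos hlt]
      rw [hs2, hn, ih (i + 1) fuel _ _ _ (by omega)]
      have hR : pvChain (m+1) (2^i) (x,y,d) = pvChain m (2 * 2^i) (pvBody (2^i) (x,y,d)) := rfl
      rw [hR, show (2:Int) * 2^i = 2^(i+1) by ring]
      rfl

theorem pv_logloop_eq : ∀ (fuel i c k : Nat), i ≤ k → k - i ≤ fuel →
    pvB_logloop fuel (2 ^ k) (2 ^ i) c = c + (k - i) := by
  intro fuel
  induction fuel with
  | zero => intro i c k h1 h2; have : i = k := by omega
            subst this; simp [pvB_logloop]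
  | succ fuel ih =>
    intro i c k h1 h2
    by_cases hik : i = k
    · subst hik; simp [pvB_logloop]
    · have hlt : (2:Int) ^ i < 2 ^ k := pow_lt_pow_right₀ one_lt_two (by omega)
      have hs2 : (2:Int) ^ i * 2 = 2 ^ (i + 1) := by rw [pow_succ]
      simp only [pvB_logloop, if_pos hlt]
      rw [hs2, ih (i + 1) (c + 1) k (by omega) (by omega)]
      omega

theorem pv_curve : ∀ m : Nat,
    (List.range (4 ^ m)).map
        (fun (d : Nat) => ((pvChain m 1 (0, 0, (d : Int))).1, (pvChain m 1 (0, 0, (d : Int))).2.1)) =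
      pvB_build m := by
  intro m
  induction m with
  | zero => simp [pvChain, pvB_build]
  | succ m ih =>
    set N := 4 ^ m with hN
    set F := fun d : Nat => ((pvChain (m+1) 1 (0, 0, (d : Int))).1, (pvChain (m+1) 1 (0, 0, (d : Int))).2.1) with hF
    set Fm := fun d : Nat => ((pvChain m 1 (0, 0, (d : Int))).1, (pvChain m 1 (0, 0, (d : Int))).2.1) with hFm
    have hsplit : 4 ^ (m+1) = N + (N + (N + N)) := by rw [hN]; ring
    have key : ∀ (t : Nat), t < 4 → ∀ d ∈ List.range N,
        F (t * N + d) = (let p := Fm d;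
          if t = 0 then ((p.2, p.1) : Int × Int)
          else if t = 1 then (p.1, p.2 + 2^m)
          else if t = 2 then (p.1 + 2^m, p.2 + 2^m)
          else (2 * 2^m - 1 - p.2, 2^m - 1 - p.1)) := by
      intro t ht d hd
      rw [List.mem_range] at hd
      have hcast : ((t * N + d : Nat) : Int) = (t : Int) * 4 ^ m + (d : Int) := by
        push_cast [hN]; ring
      have he0 : (0:Int) ≤ (d : Int) := by positivity
      have heN : (d : Int) < 4 ^ m := by
        have := hd; rw [hN] at this; exact_mod_cast this
      rw [hF]
      simp only []
      rw [hcast, pvChain_succ_last m 1, mul_one,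
        pvChain_split m 1 0 0 (t : Int) (d : Int) (by positivity) he0 heN]
      interval_cases t <;>
        simp only [Nat.cast_ofNat, Nat.cast_zero, Nat.cast_one, pvBody_t0, pvBody_t1, pvBody_t2, pvBody_t3] <;> rfl
    rw [hsplit, List.range_add, List.range_add, List.range_add]
    simp only [List.map_append, List.map_map]
    have e0 : (List.range N).map F = (pvB_build m).map (fun p => ((p.2, p.1) : Int × Int)) := by
      rw [← ih, List.map_map]
      refine List.map_congr_left (fun d hd => ?_)
      have := key 0 (by omega) d hd
      simpa using this
    have e1 : (List.range N).map (F ∘ (fun d => N + d)) = (pvB_build m).map (fun p => ((p.1, p.2 + 2^m) : Int × Int)) := by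
      rw [← ih, List.map_map]
      refine List.map_congr_left (fun d hd => ?_)
      have := key 1 (by omega) d hd
      simpa [Function.comp, one_mul] using this
    have e2 : (List.range N).map (F ∘ (fun d => N + d) ∘ (fun d => N + d)) = (pvB_build m).map (fun p => ((p.1 + 2^m, p.2 + 2^m) : Int × Int)) := by
      rw [← ih, List.map_map]
      refine List.map_congr_left (fun d hd => ?_)
      have := key 2 (by omega) d hd
      have harg : N + (N + d) = 2 * N + d := by ring
      simpa [Function.comp, harg] using this
    have e3 : (List.range N).map (F ∘ (fun d => N + d) ∘ (fun d => N + d) ∘ (fun d => N + d)) = (pvB_build m).map (fun p => ((2 * 2^m - 1 - p.2, 2^m - 1 - p.1) : Int × Int)) := by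
      rw [← ih, List.map_map]
      refine List.map_congr_left (fun d hd => ?_)
      have := key 3 (by omega) d hd
      have harg : N + (N + (N + d)) = 3 * N + d := by ring
      simpa [Function.comp, harg] using this
    rw [e0, e1, e2, e3]
    simp [pvB_build, List.append_assoc]

theorem pv_build_bounds : ∀ (m : Nat) (p : Int × Int), p ∈ pvB_build m →
    0 ≤ p.1 ∧ p.1 < 2 ^ m ∧ 0 ≤ p.2 ∧ p.2 < 2 ^ m := by
  intro m
  induction m with
  | zero => intro p hp; simp [pvB_build] at hp; subst hp; simp
  | succ m ih =>
    intro p hp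
    have hpow : (2:Int) ^ (m+1) = 2 * 2 ^ m := by ring
    have hpos : (0:Int) < 2 ^ m := by positivity
    simp only [pvB_build, List.mem_append, List.mem_map] at hp
    rcases hp with ((⟨q, hq, rfl⟩ | ⟨q, hq, rfl⟩) | ⟨q, hq, rfl⟩) | ⟨q, hq, rfl⟩ <;>
      obtain ⟨h1, h2, h3, h4⟩ := ih q hq <;> simp <;> omega

theorem pv_build_nodup : ∀ m : Nat, (pvB_build m).Nodup := by
  intro m
  induction m with
  | zero => simp [pvB_build]
  | succ m ih =>
    have hpos : (0:Int) < 2 ^ m := by positivity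
    have hb := pv_build_bounds m
    have inj0 : Function.Injective (fun p : Int × Int => ((p.2, p.1) : Int × Int)) := by
      intro p q h; simp [Prod.ext_iff] at h ⊢; omega
    have inj1 : Function.Injective (fun p : Int × Int => ((p.1, p.2 + 2^m) : Int × Int)) := by
      intro p q h; simp [Prod.ext_iff] at h ⊢; omega
    have inj2 : Function.Injective (fun p : Int × Int => ((p.1 + 2^m, p.2 + 2^m) : Int × Int)) := by
      intro p q h; simp [Prod.ext_iff] at h ⊢; omega
    have inj3 : Function.Injective (fun p : Int × Int => ((2 * 2^m - 1 - p.2, 2^m - 1 - p.1) : Int × Int)) := by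
      intro p q h; simp [Prod.ext_iff] at h ⊢; omega
    have reg0 : ∀ a ∈ (pvB_build m).map (fun p => ((p.2, p.1) : Int × Int)), a.1 < 2^m ∧ a.2 < 2^m := by
      intro a ha; simp only [List.mem_map] at ha; obtain ⟨q, hq, rfl⟩ := ha
      obtain ⟨h1, h2, h3, h4⟩ := hb q hq; exact ⟨h4, h2⟩
    have reg1 : ∀ a ∈ (pvB_build m).map (fun p => ((p.1, p.2 + 2^m) : Int × Int)), a.1 < 2^m ∧ 2^m ≤ a.2 := by
      intro a ha; simp only [List.mem_map] at ha; obtain ⟨q, hq, rfl⟩ := ha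
      obtain ⟨h1, h2, h3, h4⟩ := hb q hq; exact ⟨h2, by omega⟩
    have reg2 : ∀ a ∈ (pvB_build m).map (fun p => ((p.1 + 2^m, p.2 + 2^m) : Int × Int)), 2^m ≤ a.1 ∧ 2^m ≤ a.2 := by
      intro a ha; simp only [List.mem_map] at ha; obtain ⟨q, hq, rfl⟩ := ha
      obtain ⟨h1, h2, h3, h4⟩ := hb q hq; exact ⟨by omega, by omega⟩
    have reg3 : ∀ a ∈ (pvB_build m).map (fun p => ((2 * 2^m - 1 - p.2, 2^m - 1 - p.1) : Int × Int)), 2^m ≤ a.1 ∧ a.2 < 2^m := by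
      intro a ha; simp only [List.mem_map] at ha; obtain ⟨q, hq, rfl⟩ := ha
      obtain ⟨h1, h2, h3, h4⟩ := hb q hq
      refine ⟨?_, ?_⟩ <;> simp <;> omega
    have d01 : ((pvB_build m).map (fun p => ((p.2, p.1) : Int × Int))).Disjoint ((pvB_build m).map (fun p => ((p.1, p.2 + 2^m) : Int × Int))) := by
      intro a ha hc
      have := (reg0 a ha).2; have := (reg1 a hc).2; omega
    have d012 : (((pvB_build m).map (fun p => ((p.2, p.1) : Int × Int))) ++ ((pvB_build m).map (fun p => ((p.1, p.2 + 2^m) : Int × Int)))).Disjoint ((pvB_build m).map (fun p => ((p.1 + 2^m, p.2 + 2^m) : Int × Int))) := by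
      intro a ha hc
      have h2 := (reg2 a hc).1
      rcases List.mem_append.mp ha with h | h
      · have := (reg0 a h).1; omega
      · have := (reg1 a h).1; omega
    have d0123 : ((((pvB_build m).map (fun p => ((p.2, p.1) : Int × Int))) ++ ((pvB_build m).map (fun p => ((p.1, p.2 + 2^m) : Int × Int)))) ++ ((pvB_build m).map (fun p => ((p.1 + 2^m, p.2 + 2^m) : Int × Int)))).Disjoint ((pvB_build m).map (fun p => ((2 * 2^m - 1 - p.2, 2^m - 1 - p.1) : Int × Int))) := by
      intro a ha hc
      obtain ⟨h3a, h3b⟩ := reg3 a hc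
      rcases List.mem_append.mp ha with h | h
      · rcases List.mem_append.mp h with h' | h'
        · have := (reg0 a h').1; omega
        · have := (reg1 a h').2; omega
      · have := (reg2 a h).2; omega
    show ((pvB_build m).map _ ++ (pvB_build m).map _ ++ (pvB_build m).map _ ++ (pvB_build m).map _).Nodup
    rw [List.nodup_append, List.nodup_append, List.nodup_append]
    exact ⟨⟨⟨ih.map inj0, ih.map inj1, List.disjoint_iff_ne.mp d01⟩, ih.map inj2, List.disjoint_iff_ne.mp d012⟩, ih.map inj3, List.disjoint_iff_ne.mp d0123⟩

theorem pv_fold_seen (rows cols : Int) : ∀ (l acc : List (Int × Int)) (seen : PySem.Set (Int × Int)),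
    (l.map (fun p => ((p.2 : Int), (p.1 : Int)))).Nodup → (∀ p ∈ l, ((p.2 : Int), (p.1 : Int)) ∉ seen) →
    (l.foldl
        (fun (st : List (Int × Int) × PySem.Set (Int × Int)) p =>
          if p.2 < rows ∧ p.1 < cols ∧ (p.2, p.1) ∉ st.2 then
            (st.1 ++ [(p.2, p.1)], PySem.Set.add st.2 (p.2, p.1))
          else st)
        (acc, seen)).1
      = acc ++ (l.filter (fun p => decide (p.2 < rows ∧ p.1 < cols))).map (fun p => (p.2, p.1)) := by
  intro l
  induction l with
  | nil => intro acc seen _ _; simp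
  | cons p tl ih =>
    intro acc seen hnd hns
    simp only [List.map_cons, List.nodup_cons] at hnd
    obtain ⟨hph, hndt⟩ := hnd
    have hpseen : ((p.2 : Int), (p.1 : Int)) ∉ seen := hns p (by simp)
    by_cases hbnd : p.2 < rows ∧ p.1 < cols
    · rw [List.foldl_cons, if_pos ⟨hbnd.1, hbnd.2, hpseen⟩]
      rw [ih (acc ++ [(p.2, p.1)]) (PySem.Set.add seen (p.2, p.1)) hndt ?_]
      · simp [hbnd]
      · intro q hq hmem
        rw [PySem.Set.mem_add] at hmem
        rcases hmem with h | h
        · exact hns q (by simp [hq]) h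
        · exact hph (by
            rw [← h]
            exact List.mem_map.mpr ⟨q, hq, rfl⟩)
    · rw [List.foldl_cons, if_neg (by tauto)]
      rw [ih acc seen hndt (fun q hq => hns q (by simp [hq]))]
      simp [List.filter_cons, if_neg hbnd]

theorem pv_smear_step (w y a : Nat) (h : ∀ i, y.testBit i = true ↔ ∃ j, j < w ∧ a.testBit (i + j) = true) :
    ∀ i, (y ||| (y >>> w)).testBit i = true ↔ ∃ j, j < 2 * w ∧ a.testBit (i + j) = true := by
  intro i
  rw [Nat.testBit_or, Nat.testBit_shiftRight, Bool.or_eq_true]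
  constructor
  · rintro (hb | hb)
    · obtain ⟨j, hj, hbit⟩ := (h i).mp hb
      exact ⟨j, by omega, hbit⟩
    · obtain ⟨j, hj, hbit⟩ := (h (w + i)).mp hb
      exact ⟨w + j, by omega, by rwa [show i + (w + j) = w + i + j by omega]⟩
  · rintro ⟨j, hj, hbit⟩
    by_cases hjw : j < w
    · exact Or.inl ((h i).mpr ⟨j, hjw, hbit⟩)
    · exact Or.inr ((h (w + i)).mpr ⟨j - w, by omega, by rwa [show w + i + (j - w) = i + j by omega]⟩)

def pvSmear (a : Nat) : Nat :=
  let a1 := a ||| (a >>> 1)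
  let a2 := a1 ||| (a1 >>> 2)
  let a3 := a2 ||| (a2 >>> 4)
  let a4 := a3 ||| (a3 >>> 8)
  a4 ||| (a4 >>> 16)

theorem pv_smear_bits (a : Nat) : ∀ i, (pvSmear a).testBit i = true ↔ ∃ j, j < 32 ∧ a.testBit (i + j) = true := by
  have h0 : ∀ i, a.testBit i = true ↔ ∃ j, j < 1 ∧ a.testBit (i + j) = true := by
    intro i
    constructor
    · intro hb; exact ⟨0, by omega, by simpa⟩
    · rintro ⟨j, hj, hb⟩; have : j = 0 := by omega
      subst this; simpa using hb
  have h1 := pv_smear_step 1 a a h0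
  have h2 := pv_smear_step 2 _ a h1
  have h4 := pv_smear_step 4 _ a h2
  have h8 := pv_smear_step 8 _ a h4
  have h16 := pv_smear_step 16 _ a h8
  exact h16

theorem pv_smear_pow (a : Nat) (h : a < 2 ^ 32) : ∃ t, t ≤ 32 ∧ pvSmear a + 1 = 2 ^ t := by
  rcases Nat.eq_zero_or_pos a with rfl | hp
  · exact ⟨0, by omega, by decide⟩
  · set L := Nat.log2 a with hLdef
    have hL1 : 2 ^ L ≤ a := Nat.log2_self_le (by omega)
    have hL2 : a < 2 ^ (L + 1) := Nat.lt_log2_self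
    have hL31 : L ≤ 31 := by
      by_contra h'
      have : (2:Nat) ^ 32 ≤ 2 ^ L := Nat.pow_le_pow_right (by norm_num) (by omega)
      omega
    have hLbit : a.testBit L = true := by
      rw [Nat.testBit_eq_decide_div_mod_eq]
      have hge : 1 ≤ a / 2 ^ L := (Nat.le_div_iff_mul_le (by positivity)).mpr (by omega)
      have hlt : a / 2 ^ L < 2 := by
        rw [Nat.div_lt_iff_lt_mul (by positivity)]
        have : (2:Nat) * 2 ^ L = 2 ^ (L + 1) := by ring
        omega
      have : a / 2 ^ L = 1 := by omega
      simp [this]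
    have hsm : pvSmear a = 2 ^ (L + 1) - 1 := by
      apply Nat.eq_of_testBit_eq
      intro i
      rw [Nat.testBit_two_pow_sub_one]
      rcases lt_or_ge i (L + 1) with hi | hi
      · have : (pvSmear a).testBit i = true :=
          (pv_smear_bits a i).mpr ⟨L - i, by omega, by rwa [show i + (L - i) = L by omega]⟩
        simp [this, hi]
      · have : (pvSmear a).testBit i = false := by
          by_contra hcon
          rw [Bool.not_eq_false] at hcon
          obtain ⟨j, hj, hbit⟩ := (pv_smear_bits a i).mp hcon
          have h2le : 2 ^ (i + j) ≤ a := by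
            by_contra hlt'
            rw [Nat.testBit_lt_two_pow (by omega)] at hbit
            exact Bool.false_ne_true hbit
          have : (2:Nat) ^ (L + 1) ≤ 2 ^ (i + j) := Nat.pow_le_pow_right (by norm_num) (by omega)
          omega
        rw [this]
        simp
        omega
    refine ⟨L + 1, by omega, ?_⟩
    have : (0:Nat) < 2 ^ (L + 1) := by positivity
    omega

theorem pv_np_pow (m : Int) (hm : m ≤ 2147483648) : ∃ k : Nat, k ≤ 32 ∧ pvA_next_power_of_2 m = 2 ^ k := by
  by_cases hm0 : m ≤ 0
  · exact ⟨0, by omega, by simp [pvA_next_power_of_2, hm0]⟩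
  · set a : Nat := (m - 1).toNat with ha
    have hma : m - 1 = (a : Int) := by omega
    have hcast : ∀ (x k : Nat), PySem.Int.bor (x : Int) ((x : Int) >>> k) = ((x ||| (x >>> k) : Nat) : Int) := by
      intro x k
      rw [show ((x : Int) >>> k) = ((x >>> k : Nat) : Int) from rfl, PySem.Int.bor_natCast]
    have hlt : a < 2 ^ 32 := by
      have : (2:Int) ^ 31 = 2147483648 := by norm_num
      omega
    obtain ⟨t, ht, hts⟩ := pv_smear_pow a hlt
    refine ⟨t, ht, ?_⟩
    simp only [pvA_next_power_of_2, if_neg hm0]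
    rw [hma, hcast, hcast, hcast, hcast, hcast]
    show ((pvSmear a : Nat) : Int) + 1 = 2 ^ t
    rw [show ((2:Int) ^ t) = ((2 ^ t : Nat) : Int) by push_cast; ring]
    omega

theorem pv_np_eq : pvB_next_power_of_2 = pvA_next_power_of_2 := rfl

theorem pv_main (rows cols : Int) (hr : rows ≤ 2147483648) (hc : cols ≤ 2147483648) :
    generate_hilbert_indices_py rows cols = generate_hilbert_indices_py_alt rows cols := by
  obtain ⟨k, hk, hn⟩ := pv_np_pow (max rows cols) (max_le hr hc)
  -- B side
  have hlog : pvB_logloop 64 (2 ^ k) 1 0 = k := by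
    have h := pv_logloop_eq 64 0 0 k (by omega) (by omega)
    norm_num at h
    exact h
  have hB : generate_hilbert_indices_py_alt rows cols =
      ((pvB_build k).filter (fun p => decide (p.2 < rows ∧ p.1 < cols))).map (fun p => (p.2, p.1)) := by
    simp only [generate_hilbert_indices_py_alt, pv_np_eq, hn, hlog]
  -- A side
  have hNN : (2:Int) ^ k * 2 ^ k = (((4 ^ k : Nat) : Int)) := by
    have h4 : (4:Nat) ^ k = 2 ^ k * 2 ^ k := by rw [show (4:Nat) = 2 * 2 from rfl, mul_pow]
    rw [h4]; push_cast; ring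
  have hd2 : ∀ j : Nat, pvA_hilbert_d2xy (2 ^ k) (j : Int) =
      ((pvChain k 1 (0, 0, (j : Int))).1, (pvChain k 1 (0, 0, (j : Int))).2.1) := by
    intro j
    have := pv_loop_eq_chain k 0 64 0 0 (j : Int) (by omega)
    simpa using this
  have hA : generate_hilbert_indices_py rows cols =
      ((pvB_build k).filter (fun p => decide (p.2 < rows ∧ p.1 < cols))).map (fun p => (p.2, p.1)) := by
    simp only [generate_hilbert_indices_py, hn, hNN, PySem.List.pyRange_zero_nat]
    rw [List.foldl_map]
    have hbody : (List.range (4 ^ k)).foldl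
        (fun (st : List (Int × Int) × PySem.Set (Int × Int)) (j : Nat) =>
          let xy := pvA_hilbert_d2xy (2 ^ k) (j : Int)
          if xy.2 < rows ∧ xy.1 < cols ∧ (xy.2, xy.1) ∉ st.2 then
            (st.1 ++ [(xy.2, xy.1)], PySem.Set.add st.2 (xy.2, xy.1))
          else st)
        ([], (PySem.Set.empty : PySem.Set (Int × Int)))
        = ((List.range (4 ^ k)).map
            (fun (d : Nat) => ((pvChain k 1 (0, 0, (d : Int))).1, (pvChain k 1 (0, 0, (d : Int))).2.1))).foldl
          (fun (st : List (Int × Int) × PySem.Set (Int × Int)) p =>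
            if p.2 < rows ∧ p.1 < cols ∧ (p.2, p.1) ∉ st.2 then
              (st.1 ++ [(p.2, p.1)], PySem.Set.add st.2 (p.2, p.1))
            else st)
          ([], (PySem.Set.empty : PySem.Set (Int × Int))) := by
      rw [List.foldl_map]
      apply PySem.List.foldl_congr_mem
      intro acc j _
      simp only [hd2]
    rw [hbody, pv_curve k]
    have hinj : Function.Injective (fun p : Int × Int => ((p.2, p.1) : Int × Int)) := by
      intro p q h; simp [Prod.ext_iff] at h ⊢; omega
    have := pv_fold_seen rows cols (pvB_build k) [] (PySem.Set.empty)
      ((pv_build_nodup k).map hinj) (by intro p _ hmem; simp [PySem.Set.empty] at hmem)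
    simpa using this
  rw [hA, hB]

-- ===== VERDICT (by name: the statement is the Claim_ definition above) =====
theorem generate_hilbert_indices_py_spec : Claim_equal_generate_hilbert_indices_py := by
  intro rows cols hdom
  unfold Dom_generate_hilbert_indices_py pvDomInt at hdom
  simp only [Bool.and_eq_true, decide_eq_true_eq] at hdom
  unfold Spec_generate_hilbert_indices_py
  exact pv_main rows cols hdom.1.2 hdom.2.2
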